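-- pv_equiv track=rewrite | github.com/meebit17600/MeebitMatch | process_meebits.py | analyze_type_level_rules
-- ===== SOURCE A (Python) =====
-- from collections import defaultdict, Counter
--
-- TRAIT_CATEGORIES = [
--     "hair_style", "hair_color", "hat", "hat_color",
--     "beard", "beard_color", "glasses", "glasses_color",
--     "earring", "necklace", "shirt", "shirt_color",
--     "overshirt", "overshirt_color", "pants", "pants_color",
--     "shoes", "shoes_color", "tattoo", "tattoo_motif",
--     "jersey_number"
-- ]
--
-- def analyze_type_level_rules(records):
--     """Which trait categories can each type have?"""
--     type_traits = defaultdict(lambda: defaultdict(int))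
--     type_counts = Counter()
--
--     for r in records:
--         t = r["type"]
--         type_counts[t] += 1
--         for cat in TRAIT_CATEGORIES:
--             if r.get(cat) is not None:
--                 type_traits[t][cat] += 1
--
--     return dict(type_traits), dict(type_counts)
-- ===== SOURCE B (Python) =====
-- from collections import defaultdict, Counter
--
-- TRAIT_CATEGORIES = [
--     "hair_style", "hair_color", "hat", "hat_color",
--     "beard", "beard_color", "glasses", "glasses_color",
--     "earring", "necklace", "shirt", "shirt_color",
--     "overshirt", "overshirt_color", "pants", "pants_color",
--     "shoes", "shoes_color", "tattoo", "tattoo_motif",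
--     "jersey_number"
-- ]
--
-- def analyze_type_level_rules(records):
--     """Which trait categories can each type have?"""
--     type_counts = dict(Counter(r["type"] for r in records))
--     pair_counts = Counter(
--         (r["type"], cat)
--         for r in records
--         for cat in TRAIT_CATEGORIES
--         if r.get(cat) is not None
--     )
--     type_traits = {}
--     for (t, cat), n in pair_counts.items():
--         if t not in type_traits:
--             type_traits[t] = defaultdict(int)
--         type_traits[t][cat] = n
--     return type_traits, type_counts
-- ===== Notes on version B (the rewrite author's own statement) =====
-- stated objective: alternative
-- what changed: A builds both result dicts record-by-record in one interleaved loop with nested defaultdicts; B instead computes type_counts as a Counter over the types, flattens the records to a stream of (type, category) pairs, counts them with one Counter, and regroups that flat pair-counter into the nested dict in a final pass.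
-- outside the precondition, e.g. on analyze_type_level_rules([{'type': None}]): A returns ({}, {None: 1}), B returns ({}, {None: 1})
import Mathlib
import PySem

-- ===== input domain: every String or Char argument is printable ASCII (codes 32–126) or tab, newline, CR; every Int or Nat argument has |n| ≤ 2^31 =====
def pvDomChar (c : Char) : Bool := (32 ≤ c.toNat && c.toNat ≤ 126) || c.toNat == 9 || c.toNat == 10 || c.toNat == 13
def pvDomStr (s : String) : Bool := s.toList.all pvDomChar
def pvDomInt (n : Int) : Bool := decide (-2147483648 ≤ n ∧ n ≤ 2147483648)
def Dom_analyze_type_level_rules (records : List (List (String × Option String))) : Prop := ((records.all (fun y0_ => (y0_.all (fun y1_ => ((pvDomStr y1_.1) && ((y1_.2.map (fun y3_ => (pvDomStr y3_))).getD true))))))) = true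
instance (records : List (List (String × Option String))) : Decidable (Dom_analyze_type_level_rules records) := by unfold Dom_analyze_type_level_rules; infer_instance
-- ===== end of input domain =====

-- B replaces A's single interleaved loop over records (nested defaultdict increments) by
-- Counter-of-types + Counter-of-flattened-(type,category)-pairs + a regrouping pass (alternative decomposition, same cost).
-- Pre_ excludes records without a string "type" value: a missing key raises KeyError, and a None
-- "type" makes A return a dict keyed by None, which is not a value of the declared String-keyed type.

-- ===== PORT A =====
def pvCats : List String :=
  ["hair_style", "hair_color", "hat", "hat_color",
   "beard", "beard_color", "glasses", "glasses_color",
   "earring", "necklace", "shirt", "shirt_color",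
   "overshirt", "overshirt_color", "pants", "pants_color",
   "shoes", "shoes_color", "tattoo", "tattoo_motif",
   "jersey_number"]

-- one iteration of A's 'for r in records' loop (state: (type_traits, type_counts));
-- the '| _ => st' branch is where Python raises KeyError / leaves the declared type (excluded by Pre_)
def pvStepA (st : PySem.Dict String (PySem.Dict String Int) × PySem.Dict String Int)
    (r : List (String × Option String)) :
    PySem.Dict String (PySem.Dict String Int) × PySem.Dict String Int :=
  match (PySem.Dict.mk r).get? "type" with
  | some (some t) =>
      let tc := st.2.modify t 0 (· + 1)
      let tt := pvCats.foldl (fun tt cat =>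
          match (PySem.Dict.mk r).get? cat with
          | some (some _) =>
              tt.insert t ((tt.getD t PySem.Dict.empty).insert cat
                ((tt.getD t PySem.Dict.empty).getD cat 0 + 1))
          | _ => tt) st.1
      (tt, tc)
  | _ => st

def analyze_type_level_rules (records : List (List (String × Option String))) : (List (String × List (String × Int))) × (List (String × Int)) :=
  let st := records.foldl pvStepA (PySem.Dict.empty, PySem.Dict.empty)
  (st.1.items.map (fun p => (p.1, p.2.items)), st.2.items)

-- ===== PORT B =====
-- r["type"] when it is a string; none where Python raises KeyError or the value is None
def pvTypeOf? (r : List (String × Option String)) : Option String :=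
  match (PySem.Dict.mk r).get? "type" with
  | some (some t) => some t
  | _ => none

-- the flattened (type, category) pair stream of B's second generator
def pvPairs (records : List (List (String × Option String))) : List (String × String) :=
  records.flatMap (fun r =>
    match pvTypeOf? r with
    | some t => pvCats.filterMap (fun cat =>
        match (PySem.Dict.mk r).get? cat with
        | some (some _) => some (t, cat)
        | _ => none)
    | none => [])

def analyze_type_level_rules_alt (records : List (List (String × Option String))) : (List (String × List (String × Int))) × (List (String × Int)) :=
  let type_counts := PySem.Dict.counter (records.filterMap pvTypeOf?)
  let pair_counts := PySem.Dict.counter (pvPairs records)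
  let type_traits := pair_counts.items.foldl
    (fun tt pr => tt.insert pr.1.1 ((tt.getD pr.1.1 PySem.Dict.empty).insert pr.1.2 pr.2))
    (PySem.Dict.empty : PySem.Dict String (PySem.Dict String Int))
  (type_traits.items.map (fun p => (p.1, p.2.items)), type_counts.items)

-- ===== PRECONDITION & SPEC =====
-- Pre_ excludes records whose first "type" entry is missing (Python A raises KeyError there) or None
-- (A then returns a dict keyed by None, which is not a String-keyed value of the declared type).
def Pre_analyze_type_level_rules (records : List (List (String × Option String))) : Prop :=
  ∀ r ∈ records, ((((PySem.Dict.mk r).get? "type").bind id).isSome = true)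
instance (records : List (List (String × Option String))) : Decidable (Pre_analyze_type_level_rules records) := by unfold Pre_analyze_type_level_rules; infer_instance

def pvWitness_analyze_type_level_rules : (List (List (String × Option String))) :=
  [[("type", some "human"), ("hat", some "cap"), ("beard", none)],
   [("type", some "pig"), ("hat", some "cap")],
   [("type", some "human")]]

def Spec_analyze_type_level_rules (records : List (List (String × Option String))) (out : (List (String × List (String × Int))) × (List (String × Int))) : Prop := out = analyze_type_level_rules_alt records
instance (records : List (List (String × Option String))) (out : (List (String × List (String × Int))) × (List (String × Int))) : Decidable (Spec_analyze_type_level_rules records out) := by unfold Spec_analyze_type_level_rules; infer_instance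

-- ===== CLAIM (what is proved, stated in full; the proofs are below) =====
def Claim_equal_analyze_type_level_rules : Prop := ∀ (records : List (List (String × Option String))), Dom_analyze_type_level_rules records → Pre_analyze_type_level_rules records → Spec_analyze_type_level_rules records (analyze_type_level_rules records)

-- ===== LEMMAS AND PROOFS =====

-- COMM: inserting at a PRESENT key commutes with any insert at a different key
theorem pv_comm {κ ν : Type} [BEq κ] [LawfulBEq κ] (d : PySem.Dict κ ν) (k k' : κ)
    (h : k ≠ k') (hk : d.contains k = true) (v w : ν) :
    (d.insert k' w).insert k v = (d.insert k v).insert k' w := by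
  apply PySem.Dict.ext
  by_cases hk' : d.contains k' = true
  · rw [PySem.Dict.items_insert_of_contains _ v (by simp [PySem.Dict.contains_insert, hk]),
        PySem.Dict.items_insert_of_contains _ w hk',
        PySem.Dict.items_insert_of_contains _ w (by simp [PySem.Dict.contains_insert, hk']),
        PySem.Dict.items_insert_of_contains _ v hk,
        List.map_map, List.map_map]
    apply List.map_congr_left
    intro p _
    simp only [Function.comp]
    by_cases h1 : p.1 = k' <;> by_cases h2 : p.1 = k <;>
      simp_all [beq_iff_eq, Ne.symm h]
  · have hk'f : d.contains k' = false := by simpa using hk'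
    rw [PySem.Dict.items_insert_of_contains _ v (by simp [PySem.Dict.contains_insert, hk]),
        PySem.Dict.items_insert_of_not_contains _ w hk'f,
        PySem.Dict.items_insert_of_not_contains _ w
          (by simp [PySem.Dict.contains_insert, hk'f, Ne.symm h]),
        PySem.Dict.items_insert_of_contains _ v hk,
        List.map_append]
    simp [beq_iff_eq, Ne.symm h]

def pvSetN (tt : PySem.Dict String (PySem.Dict String Int)) (t c : String) (m : Int) :
    PySem.Dict String (PySem.Dict String Int) :=
  tt.insert t ((tt.getD t PySem.Dict.empty).insert c m)

def pvIncP (tt : PySem.Dict String (PySem.Dict String Int)) (p : String × String) :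
    PySem.Dict String (PySem.Dict String Int) :=
  pvSetN tt p.1 p.2 ((tt.getD p.1 PySem.Dict.empty).getD p.2 0 + 1)

def pvRegStep (tt : PySem.Dict String (PySem.Dict String Int)) (pr : (String × String) × Int) :
    PySem.Dict String (PySem.Dict String Int) :=
  pvSetN tt pr.1.1 pr.1.2 pr.2

def pvContainsN (tt : PySem.Dict String (PySem.Dict String Int)) (t c : String) : Prop :=
  (tt.getD t PySem.Dict.empty).contains c = true

theorem pv_setN_setN (X : PySem.Dict String (PySem.Dict String Int)) (t c : String) (m m' : Int) :
    pvSetN (pvSetN X t c m) t c m' = pvSetN X t c m' := by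
  simp [pvSetN, PySem.Dict.getD_insert_self, PySem.Dict.insert_insert_self]

theorem pv_containsN_t (X : PySem.Dict String (PySem.Dict String Int)) {t c : String}
    (h : pvContainsN X t c) : X.contains t = true := by
  by_contra hc
  have hf : X.contains t = false := by simpa using hc
  rw [pvContainsN, PySem.Dict.getD_of_not_contains _ _ hf] at h
  simp [PySem.Dict.contains_empty] at h

theorem pv_containsN_step (X : PySem.Dict String (PySem.Dict String Int)) {t c : String}
    (q : (String × String) × Int) (h : pvContainsN X t c) : pvContainsN (pvRegStep X q) t c := by
  unfold pvContainsN pvRegStep pvSetN at *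
  rcases q with ⟨⟨t', c'⟩, n⟩
  by_cases ht : t = t'
  · subst ht
    simp [PySem.Dict.getD_insert_self, PySem.Dict.contains_insert, h]
  · rw [PySem.Dict.getD_insert_of_ne _ _ _ ht]
    exact h

theorem pv_stepN_comm (X : PySem.Dict String (PySem.Dict String Int)) (t c : String) (m : Int)
    (q : (String × String) × Int) (hq : q.1 ≠ (t, c)) (h : pvContainsN X t c) :
    pvRegStep (pvSetN X t c m) q = pvSetN (pvRegStep X q) t c m := by
  rcases q with ⟨⟨t', c'⟩, n⟩
  by_cases ht : t' = t
  · subst ht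
    have hc' : c' ≠ c := by intro h'; exact hq (by simp [h'])
    unfold pvRegStep pvSetN
    simp only [PySem.Dict.getD_insert_self, PySem.Dict.insert_insert_self]
    congr 1
    exact (pv_comm _ c c' (Ne.symm hc') h m n).symm
  · unfold pvRegStep pvSetN
    rw [PySem.Dict.getD_insert_of_ne _ _ _ (fun h' => ht h'.symm),
        PySem.Dict.getD_insert_of_ne _ _ _ ht]
    exact (pv_comm X t t' (fun h' => ht h'.symm) (pv_containsN_t X h) _ _).symm

-- folding pairs that never touch (t, c) leaves the nested value at (t, c) unchanged
theorem pv_nest (v : List ((String × String) × Int)) (t c : String)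
    (hv : (t, c) ∉ v.map Prod.fst) :
    ∀ X : PySem.Dict String (PySem.Dict String Int),
      ((v.foldl pvRegStep X).getD t PySem.Dict.empty).getD c 0 =
        ((X.getD t PySem.Dict.empty)).getD c 0 := by
  induction v with
  | nil => intro X; rfl
  | cons q v ih =>
    intro X
    have hq : q.1 ≠ (t, c) := by intro h; exact hv (by simp [h])
    have hv' : (t, c) ∉ v.map Prod.fst := fun h => hv (by simp [h])
    rw [List.foldl_cons, ih hv']
    rcases q with ⟨⟨t', c'⟩, n⟩
    by_cases ht : t' = t
    · subst ht
      have hc' : c' ≠ c := by intro h'; exact hq (by simp [h'])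
      simp only [pvRegStep, pvSetN, PySem.Dict.getD_insert_self]
      rw [PySem.Dict.getD_insert_of_ne _ _ _ (fun h' => hc' h'.symm)]
    · simp only [pvRegStep, pvSetN]
      rw [PySem.Dict.getD_insert_of_ne _ _ _ (fun h' => ht h'.symm)]

-- pvSetN at a present nested key commutes out of a fold that never touches (t, c)
theorem pv_swap (v : List ((String × String) × Int)) (t c : String) (m : Int)
    (hv : (t, c) ∉ v.map Prod.fst) :
    ∀ X : PySem.Dict String (PySem.Dict String Int), pvContainsN X t c →
      pvSetN (v.foldl pvRegStep X) t c m = v.foldl pvRegStep (pvSetN X t c m) := by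
  induction v with
  | nil => intro X _; rfl
  | cons q v ih =>
    intro X hX
    have hq : q.1 ≠ (t, c) := by intro h; exact hv (by simp [h])
    have hv' : (t, c) ∉ v.map Prod.fst := fun h => hv (by simp [h])
    rw [List.foldl_cons, List.foldl_cons, ih hv' _ (pv_containsN_step X q hX),
        pv_stepN_comm X t c m q hq hX]

-- regrouping the pair-counter's items equals folding A's nested increment over the raw pairs
theorem pv_core (ps : List (String × String)) :
    (PySem.Dict.counter ps).items.foldl pvRegStep PySem.Dict.empty =
      ps.foldl pvIncP PySem.Dict.empty := by
  induction ps using List.reverseRecOn with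
  | nil => rfl
  | append_singleton ps p ih =>
    have hmod : PySem.Dict.counter (ps ++ [p]) =
        (PySem.Dict.counter ps).insert p ((PySem.Dict.counter ps).getD p 0 + 1) := by
      rw [PySem.Dict.counter_append_singleton]; rfl
    rw [List.foldl_append, List.foldl_cons, List.foldl_nil, ← ih, hmod]
    rcases p with ⟨t, c⟩
    by_cases hc : (PySem.Dict.counter ps).contains (t, c) = true
    · -- the pair is already counted: replace its value in place
      obtain ⟨n, hn⟩ : ∃ n, (PySem.Dict.counter ps).get? (t, c) = some n := by
        have := PySem.Dict.contains_eq_isSome_get? (PySem.Dict.counter ps) (t, c)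
        rw [hc] at this
        exact Option.isSome_iff_exists.mp this.symm
      have hgetD : (PySem.Dict.counter ps).getD (t, c) 0 = n :=
        PySem.Dict.getD_of_get?_eq_some _ _ hn
      have hmem : ((t, c), n) ∈ (PySem.Dict.counter ps).items :=
        PySem.Dict.mem_items_of_get?_eq_some _ hn
      obtain ⟨u, v, huv⟩ := List.append_of_mem hmem
      have hnodup : ((PySem.Dict.counter ps).items.map Prod.fst).Nodup :=
        PySem.Dict.nodup_keys_counter ps
      rw [huv, List.map_append, List.map_cons] at hnodup
      have hu : (t, c) ∉ u.map Prod.fst := by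
        intro h; exact (List.disjoint_of_nodup_append hnodup) h (by simp)
      have hv : (t, c) ∉ v.map Prod.fst := by
        have := (List.nodup_append.mp hnodup).2.1
        simp only [List.nodup_cons] at this
        exact this.1
      rw [PySem.Dict.items_insert_of_contains _ _ hc, huv, hgetD]
      have hmapu : u.map (fun q => if q.1 == (t, c) then ((t, c), n + 1) else q) = u := by
        conv_rhs => rw [← List.map_id u]
        apply List.map_congr_left
        intro q hqmem
        have : q.1 ≠ (t, c) := fun h => hu (h ▸ List.mem_map_of_mem hqmem)
        simp [this]
      have hmapv : v.map (fun q => if q.1 == (t, c) then ((t, c), n + 1) else q) = v := by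
        conv_rhs => rw [← List.map_id v]
        apply List.map_congr_left
        intro q hqmem
        have : q.1 ≠ (t, c) := fun h => hv (h ▸ List.mem_map_of_mem hqmem)
        simp [this]
      rw [List.map_append, List.map_cons, hmapu, hmapv]
      simp only [beq_self_eq_true, if_pos]
      rw [List.foldl_append, List.foldl_cons, List.foldl_append, List.foldl_cons]
      set X := u.foldl pvRegStep (PySem.Dict.empty : PySem.Dict String (PySem.Dict String Int)) with hX
      have hRS : ∀ m : Int, pvRegStep X ((t, c), m) = pvSetN X t c m := fun m => rfl
      rw [hRS, hRS]
      have hcontN : pvContainsN (pvSetN X t c n) t c := by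
        unfold pvContainsN pvSetN
        rw [PySem.Dict.getD_insert_self]
        exact PySem.Dict.contains_insert_self _ _ _
      have hval : ((v.foldl pvRegStep (pvSetN X t c n)).getD t PySem.Dict.empty).getD c 0 = n := by
        rw [pv_nest v t c hv]
        unfold pvSetN
        rw [PySem.Dict.getD_insert_self, PySem.Dict.getD_insert_self]
      show v.foldl pvRegStep (pvSetN X t c (n + 1)) = pvIncP (v.foldl pvRegStep (pvSetN X t c n)) (t, c)
      unfold pvIncP
      rw [hval, pv_swap v t c (n + 1) hv _ hcontN, pv_setN_setN]
    · -- fresh pair: appended with count 1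
      have hcf : (PySem.Dict.counter ps).contains (t, c) = false := by simpa using hc
      rw [PySem.Dict.items_insert_of_not_contains _ _ hcf,
          PySem.Dict.getD_of_not_contains _ _ hcf, List.foldl_append, List.foldl_cons,
          List.foldl_nil]
      have hnotmem : (t, c) ∉ (PySem.Dict.counter ps).items.map Prod.fst := by
        intro h
        have hk : (t, c) ∈ (PySem.Dict.counter ps).keys := h
        rw [← PySem.Dict.contains_iff_mem_keys] at hk
        rw [hk] at hcf; exact absurd hcf (by simp)
      show pvSetN _ t c (0 + 1) = pvIncP _ (t, c)
      unfold pvIncP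
      rw [pv_nest _ t c hnotmem]
      simp [PySem.Dict.getD_empty]

-- one record's slice of B's pair stream
def pvPairsOf (r : List (String × Option String)) : List (String × String) :=
  match pvTypeOf? r with
  | some t => pvCats.filterMap (fun cat =>
      match (PySem.Dict.mk r).get? cat with
      | some (some _) => some (t, cat)
      | _ => none)
  | none => []

theorem pv_inner (r : List (String × Option String)) (t : String)
    (ht : (PySem.Dict.mk r).get? "type" = some (some t))
    (tt : PySem.Dict String (PySem.Dict String Int)) :
    pvCats.foldl (fun tt cat =>
        match (PySem.Dict.mk r).get? cat with
        | some (some _) =>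
            tt.insert t ((tt.getD t PySem.Dict.empty).insert cat
              ((tt.getD t PySem.Dict.empty).getD cat 0 + 1))
        | _ => tt) tt
      = (pvPairsOf r).foldl pvIncP tt := by
  unfold pvPairsOf pvTypeOf?
  rw [ht, List.foldl_filterMap]
  apply List.foldl_ext
  intro acc cat _
  rcases h : (PySem.Dict.mk r).get? cat with _ | o
  · rfl
  · rcases o with _ | s
    · rfl
    · simp [pvIncP, pvSetN]

theorem pv_split (records : List (List (String × Option String)))
    (hpre : ∀ r ∈ records, ((((PySem.Dict.mk r).get? "type").bind id).isSome = true)) :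
    ∀ st, records.foldl pvStepA st =
      ((records.flatMap pvPairsOf).foldl pvIncP st.1,
       (records.filterMap pvTypeOf?).foldl (fun d x => d.modify x 0 (· + 1)) st.2) := by
  induction records with
  | nil => intro st; rfl
  | cons r rs ih =>
    intro st
    obtain ⟨t, ht⟩ : ∃ t, (PySem.Dict.mk r).get? "type" = some (some t) := by
      have := hpre r (by simp)
      rcases h : (PySem.Dict.mk r).get? "type" with _ | o
      · rw [h] at this; simp at this
      · rcases o with _ | s
        · rw [h] at this; simp at this
        · exact ⟨s, rfl⟩
    have hstep : pvStepA st r =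
        ((pvPairsOf r).foldl pvIncP st.1, st.2.modify t 0 (· + 1)) := by
      unfold pvStepA
      rw [ht]
      simp only []
      rw [pv_inner r t ht]
    rw [List.foldl_cons, hstep, ih (fun r' hr' => hpre r' (by simp [hr'])),
        List.flatMap_cons, List.foldl_append]
    have htf : pvTypeOf? r = some t := by unfold pvTypeOf?; rw [ht]
    rw [List.filterMap_cons, htf]
    rfl

theorem pv_main (records : List (List (String × Option String)))
    (hpre : Pre_analyze_type_level_rules records) :
    analyze_type_level_rules records = analyze_type_level_rules_alt records := by
  unfold analyze_type_level_rules analyze_type_level_rules_alt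
  rw [pv_split records hpre (PySem.Dict.empty, PySem.Dict.empty)]
  have hreg : (fun (tt : PySem.Dict String (PySem.Dict String Int))
      (pr : (String × String) × Int) =>
        tt.insert pr.1.1 ((tt.getD pr.1.1 PySem.Dict.empty).insert pr.1.2 pr.2)) = pvRegStep := rfl
  have hpp : pvPairs records = records.flatMap pvPairsOf := rfl
  simp only [hreg, hpp, pv_core, ← PySem.Dict.counter_eq_foldl]

-- ===== VERDICT (by name: the statement is the Claim_ definition above) =====
theorem analyze_type_level_rules_spec : Claim_equal_analyze_type_level_rules :=
  fun records _ hpre => pv_main records hpre
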